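-- pv_equiv track=rewrite | github.com/HoangDat2204/Mathematic_Label_Inference_Attack_Machine_Unlearning | main_attack.py | create_balanced_labels
-- ===== SOURCE A (Python) =====
-- def create_balanced_labels(batch_size, num_classes=10):
--     """
--     Tạo một danh sách nhãn giả định (Baseline) với phân phối đều.
--     """
--     labels = []
--     base_count = batch_size // num_classes
--     remainder = batch_size % num_classes
--
--     for i in range(num_classes):
--         count = base_count + 1 if i < remainder else base_count
--         labels.extend([i] * count)
--
--     return sorted(labels)
-- ===== SOURCE B (Python) =====
-- def create_balanced_labels(batch_size, num_classes=10):
--     """Round-robin: tile the class cycle enough times, truncate, sort."""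
--     cycle = list(range(num_classes)) * (batch_size // num_classes + 1)
--     return sorted(cycle[:batch_size])
-- ===== Notes on version B (the rewrite author's own statement) =====
-- stated objective: simpler
-- what changed: Replaces the per-class count-then-fill loop (base_count + conditional remainder per class) with tiling the class cycle list(range(num_classes)) enough times, truncating to batch_size, and sorting; no per-class counts or branch are maintained.
import Mathlib
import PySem

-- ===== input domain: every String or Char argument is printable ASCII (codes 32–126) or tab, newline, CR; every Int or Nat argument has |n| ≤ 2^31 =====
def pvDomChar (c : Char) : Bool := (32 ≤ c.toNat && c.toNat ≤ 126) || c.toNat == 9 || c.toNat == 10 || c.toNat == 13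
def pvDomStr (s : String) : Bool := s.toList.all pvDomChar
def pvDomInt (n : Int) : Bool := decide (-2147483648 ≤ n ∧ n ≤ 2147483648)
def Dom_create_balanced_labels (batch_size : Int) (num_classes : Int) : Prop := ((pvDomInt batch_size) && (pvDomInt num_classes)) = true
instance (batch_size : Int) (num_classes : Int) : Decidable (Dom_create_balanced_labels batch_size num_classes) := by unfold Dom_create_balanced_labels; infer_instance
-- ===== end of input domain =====

-- B replaces A's per-class count-then-fill loop by tiling the class cycle and truncating,
-- letting one sort produce the grouping (objective: simpler).

-- ===== PORT A =====
def create_balanced_labels (batch_size : Int) (num_classes : Int) : List Int :=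
  let base_count := PySem.Int.floordiv batch_size num_classes
  let remainder := PySem.Int.mod batch_size num_classes
  let labels := (PySem.List.pyRange 0 num_classes 1).foldl
    (fun labels i =>
      let count := if i < remainder then base_count + 1 else base_count
      labels ++ PySem.List.pyRepeat [i] count) []
  PySem.List.sorted labels (fun x => x)

-- ===== PORT B =====
def create_balanced_labels_alt (batch_size : Int) (num_classes : Int) : List Int :=
  let cycle := PySem.List.pyRepeat (PySem.List.pyRange 0 num_classes 1)
    (PySem.Int.floordiv batch_size num_classes + 1)
  PySem.List.sorted (PySem.List.slice cycle none (some batch_size)) (fun x => x)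

-- ===== PRECONDITION & SPEC =====
-- num_classes = 0 makes both Pythons raise ZeroDivisionError on '//'; everything else is admitted.
def Pre_create_balanced_labels (batch_size : Int) (num_classes : Int) : Prop := num_classes ≠ 0
instance (batch_size : Int) (num_classes : Int) : Decidable (Pre_create_balanced_labels batch_size num_classes) := by unfold Pre_create_balanced_labels; infer_instance

def pvWitness_create_balanced_labels : Int × Int := (7, 3)

def Spec_create_balanced_labels (batch_size : Int) (num_classes : Int) (out : List Int) : Prop := out = create_balanced_labels_alt batch_size num_classes
instance (batch_size : Int) (num_classes : Int) (out : List Int) : Decidable (Spec_create_balanced_labels batch_size num_classes out) := by unfold Spec_create_balanced_labels; infer_instance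

-- ===== CLAIM (what is proved, stated in full; the proofs are below) =====
def Claim_equal_create_balanced_labels : Prop := ∀ (batch_size : Int) (num_classes : Int), Dom_create_balanced_labels batch_size num_classes → Pre_create_balanced_labels batch_size num_classes → Spec_create_balanced_labels batch_size num_classes (create_balanced_labels batch_size num_classes)

-- ===== LEMMAS AND PROOFS =====

-- shuffle A ++ (B ++ C) into B ++ (A ++ C)
lemma pv_perm_middle {α : Type} (A B C : List α) : (A ++ (B ++ C)).Perm (B ++ (A ++ C)) := by
  rw [← List.append_assoc, ← List.append_assoc]
  exact List.perm_append_comm.append_right C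

-- interleaving one extra copy of each element into a flatMap is a permutation
lemma pv_flatMap_cons_perm {α : Type} (xs : List α) (f : α → List α) :
    (xs.flatMap (fun i => i :: f i)).Perm (xs ++ xs.flatMap f) := by
  induction xs with
  | nil => simp
  | cons x xs ih =>
    simp only [List.flatMap_cons, List.cons_append]
    refine List.Perm.cons x ?_
    exact ((ih.append_left (f x))).trans (pv_perm_middle (f x) xs (xs.flatMap f))

-- the truncated tiling is a permutation of the count-then-fill list
lemma pv_take_flatten_perm {α : Type} (S T : List α) (q : Nat) :
    (S.flatMap (fun i => List.replicate (q + 1) i) ++ T.flatMap (fun i => List.replicate q i)).Perm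
      (List.take (q * (S.length + T.length) + S.length)
        (List.flatten (List.replicate (q + 1) (S ++ T)))) := by
  induction q with
  | zero =>
    have hT : List.flatMap (fun (i : α) => ([] : List α)) T = [] :=
      List.flatMap_eq_nil_iff.mpr (fun x _ => rfl)
    simp [hT]
  | succ q ih =>
    have hrep : List.replicate (q + 1 + 1) (S ++ T) = (S ++ T) :: List.replicate (q + 1) (S ++ T) := rfl
    rw [hrep, List.flatten_cons]
    have hlen : (q + 1) * (S.length + T.length) + S.length
        = (S ++ T).length + (q * (S.length + T.length) + S.length) := by
      simp [List.length_append]; ring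
    rw [hlen, List.take_append, List.take_of_length_le (by simp), Nat.add_sub_cancel_left]
    refine List.Perm.trans ?_ ((ih).append_left (S ++ T))
    have h1 : (S.flatMap (fun i => List.replicate (q + 1 + 1) i)).Perm
        (S ++ S.flatMap (fun i => List.replicate (q + 1) i)) := by
      have he : (fun (i : α) => List.replicate (q + 1 + 1) i) = fun i => i :: List.replicate (q + 1) i := by
        funext i; simp [List.replicate]
      rw [he]; exact pv_flatMap_cons_perm S _
    have h2 : (T.flatMap (fun i => List.replicate (q + 1) i)).Perm
        (T ++ T.flatMap (fun i => List.replicate q i)) := by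
      have he : (fun (i : α) => List.replicate (q + 1) i) = fun i => i :: List.replicate q i := by
        funext i; simp [List.replicate]
      rw [he]; exact pv_flatMap_cons_perm T _
    refine (h1.append h2).trans ?_
    rw [List.append_assoc S, List.append_assoc S]
    exact (pv_perm_middle (S.flatMap fun i => List.replicate (q+1) i) T _).append_left S

-- blocks of equal elements over a strictly increasing spine are nondecreasing
lemma pv_pairwise_le_flatMap_replicate (xs : List Int) (c : Int → Nat)
    (h : xs.Pairwise (· < ·)) :
    (xs.flatMap (fun i => List.replicate (c i) i)).Pairwise (· ≤ ·) := by
  induction xs with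
  | nil => simp
  | cons x xs ih =>
    rw [List.pairwise_cons] at h
    rw [List.flatMap_cons, List.pairwise_append]
    refine ⟨List.pairwise_replicate.mpr (Or.inr le_rfl), ih h.2, ?_⟩
    intro a ha b hb
    rw [List.eq_of_mem_replicate ha]
    rw [List.mem_flatMap] at hb
    obtain ⟨i, hi, hbi⟩ := hb
    rw [List.eq_of_mem_replicate hbi]
    exact le_of_lt (h.1 i hi)

-- ===== VERDICT (by name: the statement is the Claim_ definition above) =====
theorem create_balanced_labels_spec : Claim_equal_create_balanced_labels := by
  intro bs nc _ hnc
  unfold Spec_create_balanced_labels create_balanced_labels create_balanced_labels_alt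
  dsimp only
  rcases lt_trichotomy nc 0 with hneg | hz | hpos
  · -- negative num_classes: both sides are sorted []
    rw [PySem.List.pyRange_one_eq_nil (le_of_lt hneg)]
    simp [PySem.List.pyRepeat, PySem.List.slice]
  · exact absurd hz hnc
  · -- positive num_classes
    obtain ⟨n, rfl⟩ := Int.eq_ofNat_of_zero_le hpos.le
    have hn : 0 < n := by exact_mod_cast hpos
    rcases lt_or_ge bs 0 with hbs | hbs
    · -- negative batch_size: every count is ≤ 0 and the tiling factor is ≤ 0, both sides empty
      have hq : PySem.Int.floordiv bs (n : Int) < 0 := by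
        rw [PySem.Int.floordiv_lt_iff_lt_mul hpos]
        simpa using hbs
      have hA : ∀ i : Int,
          PySem.List.pyRepeat [i] (if i < PySem.Int.mod bs (n : Int)
            then PySem.Int.floordiv bs (n : Int) + 1 else PySem.Int.floordiv bs (n : Int)) = [] := by
        intro i
        rw [PySem.List.pyRepeat_singleton]
        have : ((if i < PySem.Int.mod bs (n : Int)
            then PySem.Int.floordiv bs (n : Int) + 1 else PySem.Int.floordiv bs (n : Int))).toNat = 0 := by
          split_ifs <;> omega
        simp [this]
      have hB : (PySem.Int.floordiv bs (n : Int) + 1).toNat = 0 := by omega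
      simp only [hA]
      rw [PySem.List.foldl_append_eq_flatMap]
      have : (PySem.List.pyRange 0 (n : Int) 1).flatMap (fun _ : Int => ([] : List Int)) = [] :=
        List.flatMap_eq_nil_iff.mpr (fun _ _ => rfl)
      simp [this, PySem.List.pyRepeat, hB, PySem.List.slice]
    · -- nonnegative batch_size: the real balanced case
      obtain ⟨b, rfl⟩ := Int.eq_ofNat_of_zero_le hbs
      have hr : b % n < n := Nat.mod_lt b hn
      set q : Nat := b / n with hqdef
      set r : Nat := b % n with hrdef
      -- A's loop, as a flatMap of replicate blocks
      rw [PySem.List.foldl_append_eq_flatMap]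
      have hfun : (fun i : Int => PySem.List.pyRepeat [i]
            (if i < PySem.Int.mod (b : Int) (n : Int)
              then PySem.Int.floordiv (b : Int) (n : Int) + 1
              else PySem.Int.floordiv (b : Int) (n : Int)))
          = fun i : Int => List.replicate (if i < (r : Int) then q + 1 else q) i := by
        funext i
        rw [PySem.List.pyRepeat_singleton, PySem.Int.floordiv_natCast, PySem.Int.mod_natCast]
        congr 1
        split_ifs <;> norm_cast
      rw [hfun]
      set c : Int → Nat := fun i => if i < (r : Int) then q + 1 else q with hcdef
      have hpairR : (PySem.List.pyRange 0 (n : Int) 1).Pairwise (· < ·) :=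
        PySem.List.pairwise_lt_pyRange_one 0 (n : Int)
      have hpairL : ((PySem.List.pyRange 0 (n : Int) 1).flatMap
          (fun i => List.replicate (c i) i)).Pairwise (· ≤ ·) :=
        pv_pairwise_le_flatMap_replicate _ c hpairR
      -- sorted of A's already-nondecreasing list is itself
      rw [List.nil_append, PySem.List.sorted_eq_self_of_pairwise _ _ hpairL]
      -- B's side: truncated tiling
      rw [PySem.Int.floordiv_natCast]
      have hq1 : ((q : Int) + 1).toNat = q + 1 := by norm_cast
      have hcyc : PySem.List.pyRepeat (PySem.List.pyRange 0 (n : Int) 1) ((q : Int) + 1)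
          = (List.replicate (q + 1) (PySem.List.pyRange 0 (n : Int) 1)).flatten := by
        simp [PySem.List.pyRepeat, hq1]
      rw [hcyc, PySem.List.slice_to_natCast]
      -- split the range at r
      have hsplit : PySem.List.pyRange 0 (n : Int) 1
          = PySem.List.pyRange 0 (r : Int) 1 ++ PySem.List.pyRange (r : Int) (n : Int) 1 :=
        PySem.List.pyRange_one_append 0 (r : Int) (n : Int) (by positivity) (by exact_mod_cast hr.le)
      set S : List Int := PySem.List.pyRange 0 (r : Int) 1 with hSdef
      set T : List Int := PySem.List.pyRange (r : Int) (n : Int) 1 with hTdef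
      have hSlen : S.length = r := by simp [hSdef, PySem.List.length_pyRange_one]
      have hTlen : T.length = n - r := by simp [hTdef, PySem.List.length_pyRange_one]
      have hflat : (PySem.List.pyRange 0 (n : Int) 1).flatMap (fun i => List.replicate (c i) i)
          = S.flatMap (fun i => List.replicate (q + 1) i) ++ T.flatMap (fun i => List.replicate q i) := by
        rw [hsplit, List.flatMap_append]
        congr 1
        · refine List.flatMap_congr (fun i hi => ?_)
          have := (PySem.List.mem_pyRange_one).mp (hSdef ▸ hi)
          simp [hcdef, this.2]
        · refine List.flatMap_congr (fun i hi => ?_)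
          have := (PySem.List.mem_pyRange_one).mp (hTdef ▸ hi)
          simp [hcdef, not_lt.mpr this.1]
      have hb : q * (S.length + T.length) + S.length = b := by
        rw [hSlen, hTlen]
        have hrn : r + (n - r) = n := by omega
        rw [hrn, hqdef, hrdef, Nat.mul_comm]
        exact Nat.div_add_mod b n
      have hperm := pv_take_flatten_perm S T q
      rw [hb, ← hsplit] at hperm
      rw [hflat]
      exact (PySem.List.sorted_id_eq_of_perm_of_pairwise _ _ hperm (hflat ▸ hpairL)).symm
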